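-- pv_equiv track=rewrite | github.com/theoneandoney/mit600 | assignment02/ps2b.py | diophantine2
-- ===== SOURCE A (Python) =====
-- def diophantine2(num, packages):
--     # Returns the number of solutions to the diophantine equation
--     # x*a + y*b + z*c = num
--     # where a, b, and c are non-negative integers
--     x = packages[0]
--     y = packages[1]
--     z = packages[2]
--     sol_cnt = 0
--     for a in range(num//x + 1):
--         for b in range(num//y + 1):
--             for c in range(num//z + 1):
--                 if x*a + y*b + z*c == num:
--                     sol_cnt += 1
--     return sol_cnt
-- ===== SOURCE B (Python) =====
-- def diophantine2(num, packages):
--     # Meet in the middle: tabulate the multiplicity of every pair sum y*b + z*c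
--     # in a dict once, then a single pass over a adds the multiplicity of the
--     # complement num - x*a.  No candidate a means no solutions at all.
--     x = packages[0]
--     y = packages[1]
--     z = packages[2]
--     if num//x < 0:
--         return 0
--     pair_sums = {}
--     for b in range(num//y + 1):
--         for c in range(num//z + 1):
--             s = y*b + z*c
--             pair_sums[s] = pair_sums.get(s, 0) + 1
--     total = 0
--     for a in range(num//x + 1):
--         total += pair_sums.get(num - x*a, 0)
--     return total
-- ===== Notes on version B (the rewrite author's own statement) =====
-- stated objective: alternative
-- what changed: Meet-in-the-middle: the counts of all pair sums y*b + z*c are tabulated in a dict in one pass, after which a single loop over a looks up the multiplicity of the complement num - x*a, replacing A's triple nested loop.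
import Mathlib
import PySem

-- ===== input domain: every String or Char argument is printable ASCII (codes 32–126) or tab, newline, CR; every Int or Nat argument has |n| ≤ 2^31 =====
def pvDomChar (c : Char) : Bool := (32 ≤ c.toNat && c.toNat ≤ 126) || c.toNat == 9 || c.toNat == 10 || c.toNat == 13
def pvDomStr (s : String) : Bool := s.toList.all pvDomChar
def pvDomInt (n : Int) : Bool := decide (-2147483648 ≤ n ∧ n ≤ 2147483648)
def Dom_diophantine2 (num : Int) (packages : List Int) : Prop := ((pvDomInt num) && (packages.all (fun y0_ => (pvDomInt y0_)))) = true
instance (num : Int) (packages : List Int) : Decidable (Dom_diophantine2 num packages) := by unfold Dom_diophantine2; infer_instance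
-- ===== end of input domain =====

-- B replaces A's triple nested loop by meet-in-the-middle: tabulate the multiplicity of
-- every pair sum y*b + z*c in a dict once, then one pass over a looks up num - x*a.

-- ===== PORT A =====
def diophantine2 (num : Int) (packages : List Int) : Int :=
  let x := PySem.List.pyGetD packages 0 0
  let y := PySem.List.pyGetD packages 1 0
  let z := PySem.List.pyGetD packages 2 0
  (PySem.List.pyRange 0 (PySem.Int.floordiv num x + 1) 1).foldl (fun s a =>
    (PySem.List.pyRange 0 (PySem.Int.floordiv num y + 1) 1).foldl (fun s b =>
      (PySem.List.pyRange 0 (PySem.Int.floordiv num z + 1) 1).foldl (fun s c =>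
        if x * a + y * b + z * c = num then s + 1 else s) s) s) 0

-- ===== PORT B =====
def diophantine2_alt (num : Int) (packages : List Int) : Int :=
  let x := PySem.List.pyGetD packages 0 0
  let y := PySem.List.pyGetD packages 1 0
  let z := PySem.List.pyGetD packages 2 0
  if PySem.Int.floordiv num x < 0 then 0 else
  let pair_sums : PySem.Dict Int Int :=
    (PySem.List.pyRange 0 (PySem.Int.floordiv num y + 1) 1).foldl (fun d b =>
      (PySem.List.pyRange 0 (PySem.Int.floordiv num z + 1) 1).foldl (fun d c =>
        let s := y * b + z * c
        d.insert s (d.getD s 0 + 1)) d) PySem.Dict.empty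
  (PySem.List.pyRange 0 (PySem.Int.floordiv num x + 1) 1).foldl (fun total a =>
    total + pair_sums.getD (num - x * a) 0) 0

-- ===== PRECONDITION & SPEC =====
-- Pre_ excludes exactly where A raises: packages with fewer than 3 elements (IndexError) and a
-- zero divisor that A's loops actually reach (ZeroDivisionError): num//y is only computed when
-- the outer range is nonempty, and num//z only when the middle range is nonempty too.
def Pre_diophantine2 (num : Int) (packages : List Int) : Prop :=
  3 ≤ packages.length ∧ PySem.List.pyGetD packages 0 0 ≠ 0 ∧
    (PySem.Int.floordiv num (PySem.List.pyGetD packages 0 0) < 0 ∨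
      (PySem.List.pyGetD packages 1 0 ≠ 0 ∧
        (PySem.Int.floordiv num (PySem.List.pyGetD packages 1 0) < 0 ∨
          PySem.List.pyGetD packages 2 0 ≠ 0)))
instance (num : Int) (packages : List Int) : Decidable (Pre_diophantine2 num packages) := by
  unfold Pre_diophantine2; infer_instance
def pvWitness_diophantine2 : Int × List Int := (10, [1, 2, 3])

def Spec_diophantine2 (num : Int) (packages : List Int) (out : Int) : Prop := out = diophantine2_alt num packages
instance (num : Int) (packages : List Int) (out : Int) : Decidable (Spec_diophantine2 num packages out) := by unfold Spec_diophantine2; infer_instance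

-- ===== CLAIM (what is proved, stated in full; the proofs are below) =====
def Claim_equal_diophantine2 : Prop := ∀ (num : Int) (packages : List Int), Dom_diophantine2 num packages → Pre_diophantine2 num packages → Spec_diophantine2 num packages (diophantine2 num packages)

-- ===== LEMMAS AND PROOFS =====

-- A nested loop feeding each produced value f b c to one accumulator step is the
-- flat loop over the list of produced values.
theorem foldl_nested_flatMap {α β γ δ : Type} (L2 : List α) (L3 : List β)
    (f : α → β → γ) (step : δ → γ → δ) (d : δ) :
    L2.foldl (fun d b => L3.foldl (fun d c => step d (f b c)) d) d =
      (L2.flatMap fun b => L3.map (f b)).foldl step d := by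
  induction L2 generalizing d with
  | nil => rfl
  | cons hd tl ih =>
    simp only [List.flatMap_cons, List.foldl_append, List.foldl_cons, List.foldl_map]
    exact ih _

theorem diophantine2_spec : Claim_equal_diophantine2 := by
  intro num packages _ _
  unfold Spec_diophantine2 diophantine2 diophantine2_alt
  simp only
  by_cases hg : PySem.Int.floordiv num (PySem.List.pyGetD packages 0 0) < 0
  · -- no candidate a: A's outer loop is empty and B returns 0 at the guard
    rw [if_pos hg, PySem.List.pyRange_one_eq_nil (by omega :
      PySem.Int.floordiv num (PySem.List.pyGetD packages 0 0) + 1 ≤ 0)]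
    rfl
  rw [if_neg hg]
  set x := PySem.List.pyGetD packages 0 0
  set y := PySem.List.pyGetD packages 1 0
  set z := PySem.List.pyGetD packages 2 0
  set L2 := PySem.List.pyRange 0 (PySem.Int.floordiv num y + 1) 1 with hL2
  set L3 := PySem.List.pyRange 0 (PySem.Int.floordiv num z + 1) 1 with hL3
  set S := L2.flatMap (fun b => L3.map (fun c => y * b + z * c)) with hS
  -- B's dict is a counter of S
  have hB : ∀ k : Int,
      (L2.foldl (fun d b => L3.foldl (fun d c =>
          d.insert (y * b + z * c) (d.getD (y * b + z * c) 0 + 1)) d)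
        (PySem.Dict.empty : PySem.Dict Int Int)).getD k 0 = (S.count k : Int) := by
    intro k
    rw [foldl_nested_flatMap L2 L3 (fun b c => y * b + z * c)
          (fun d t => d.insert t (d.getD t 0 + 1)) (PySem.Dict.empty : PySem.Dict Int Int)]
    rw [PySem.Dict.getD_foldl_insert_add_one]
    simp [PySem.Dict.empty, PySem.Dict.getD, PySem.Dict.get?, ← hS]
  apply PySem.List.foldl_congr_mem
  intro s a _
  -- A's inner two loops for this a count matches of num - x*a in S
  simp only [add_assoc]
  rw [foldl_nested_flatMap L2 L3 (fun b c => y * b + z * c)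
        (fun s t => if x * a + t = num then s + 1 else s) s]
  rw [PySem.List.foldl_ite_add_one]
  rw [hB]
  have hc : S.countP (fun t => decide (x * a + t = num)) = S.count (num - x * a) := by
    rw [List.count]
    apply List.countP_congr
    intro t _
    simp only [decide_eq_true_eq, beq_iff_eq]
    omega
  rw [hc]
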